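-- pv_equiv track=rewrite | github.com/Amitav-Krishna/composium | voicebeat/app/utils/music_theory.py | get_chord_for_scale_degree
-- ===== SOURCE A (Python) =====
-- NOTE_NAMES = ["C", "C#", "D", "D#", "E", "F", "F#", "G", "G#", "A", "A#", "B"]
--
-- SCALE_INTERVALS = {
--     "major": [0, 2, 4, 5, 7, 9, 11],
--     "minor": [0, 2, 3, 5, 7, 8, 10],
--     "dorian": [0, 2, 3, 5, 7, 9, 10],
--     "mixolydian": [0, 2, 4, 5, 7, 9, 10],
--     "pentatonic_major": [0, 2, 4, 7, 9],
--     "pentatonic_minor": [0, 3, 5, 7, 10],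
--     "blues": [0, 3, 5, 6, 7, 10],
-- }
--
-- def get_scale_notes(root: str, scale_type: str = "major") -> list[int]:
--     """
--     Get MIDI note numbers for a scale starting at the given root.
--
--     Args:
--         root: Root note (e.g., "C", "F#", "Bb")
--         scale_type: Type of scale (major, minor, etc.)
--
--     Returns:
--         List of MIDI note numbers for one octave of the scale (starting at octave 4)
--     """
--     root_midi = note_name_to_midi(root + "4")
--     intervals = SCALE_INTERVALS.get(scale_type, SCALE_INTERVALS["major"])
--
--     return [root_midi + interval for interval in intervals]
--
-- def note_name_to_midi(note: str) -> int:
--     """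
--     Convert note name to MIDI number.
--
--     Args:
--         note: Note name like "C4", "F#5", "Bb3"
--
--     Returns:
--         MIDI note number
--     """
--     # Parse note name
--     note = note.strip()
--
--     # Handle flats by converting to sharps
--     note = note.replace("Db", "C#").replace("Eb", "D#").replace("Fb", "E")
--     note = note.replace("Gb", "F#").replace("Ab", "G#").replace("Bb", "A#")
--
--     # Extract note and octave
--     if len(note) >= 2 and note[1] == "#":
--         note_name = note[:2]
--         octave_str = note[2:]
--     else:
--         note_name = note[0]
--         octave_str = note[1:]
--
--     try:
--         octave = int(octave_str)
--     except ValueError: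
--         octave = 4  # Default octave
--
--     # Find note index
--     note_index = NOTE_NAMES.index(note_name) if note_name in NOTE_NAMES else 0
--
--     return (octave + 1) * 12 + note_index
--
-- def get_chord_for_scale_degree(
--     degree: int,
--     root: str,
--     scale_type: str = "major",
-- ) -> list[int]:
--     """
--     Get the chord (triad) for a scale degree.
--
--     Args:
--         degree: Scale degree (1-7)
--         root: Root note of the key
--         scale_type: Type of scale
--
--     Returns:
--         List of MIDI note numbers forming the chord (starting at octave 4)
--     """
--     scale_notes = get_scale_notes(root, scale_type)
--
--     # Get the root of the chord (0-indexed degree)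
--     chord_root_index = (degree - 1) % len(scale_notes)
--     chord_third_index = (chord_root_index + 2) % len(scale_notes)
--     chord_fifth_index = (chord_root_index + 4) % len(scale_notes)
--
--     # Handle octave wrapping
--     chord_root = scale_notes[chord_root_index]
--     chord_third = scale_notes[chord_third_index]
--     chord_fifth = scale_notes[chord_fifth_index]
--
--     # Ensure ascending order
--     while chord_third < chord_root:
--         chord_third += 12
--     while chord_fifth < chord_third:
--         chord_fifth += 12
--
--     return [chord_root, chord_third, chord_fifth]
-- ===== SOURCE B (Python) =====
-- # B: parses the root pitch with a single left-to-right flat-normalizing scan and a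
-- # pitch-class dictionary, and reads the triad straight out of a precomputed
-- # two-octave interval table, instead of A's six whole-string replace passes,
-- # list.index search, modular third/fifth indexing and octave-fixing while-loops.
--
-- SCALE_INTERVALS = {
--     "major": [0, 2, 4, 5, 7, 9, 11],
--     "minor": [0, 2, 3, 5, 7, 8, 10],
--     "dorian": [0, 2, 3, 5, 7, 9, 10],
--     "mixolydian": [0, 2, 4, 5, 7, 9, 10],
--     "pentatonic_major": [0, 2, 4, 7, 9],
--     "pentatonic_minor": [0, 3, 5, 7, 10],
--     "blues": [0, 3, 5, 6, 7, 10],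
-- }
--
-- # two octaves of each scale: ascending, so a triad is three direct reads
-- EXT_INTERVALS = {name: iv + [x + 12 for x in iv] for name, iv in SCALE_INTERVALS.items()}
--
-- FLAT_TO_SHARP = {"D": "C#", "E": "D#", "F": "E", "G": "F#", "A": "G#", "B": "A#"}
--
-- PITCH_CLASS = {"C": 0, "C#": 1, "D": 2, "D#": 3, "E": 4, "F": 5,
--                "F#": 6, "G": 7, "G#": 8, "A": 9, "A#": 10, "B": 11}
--
--
-- def _normalize_flats(s: str) -> str:
--     out = []
--     i = 0
--     while i < len(s):
--         if i + 1 < len(s) and s[i + 1] == "b" and s[i] in FLAT_TO_SHARP: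
--             out.append(FLAT_TO_SHARP[s[i]])
--             i += 2
--         else:
--             out.append(s[i])
--             i += 1
--     return "".join(out)
--
--
-- def _root_midi(note: str) -> int:
--     note = _normalize_flats(note.strip())
--     if len(note) >= 2 and note[1] == "#":
--         name, tail = note[:2], note[2:]
--     else:
--         name, tail = note[:1], note[1:]
--     try:
--         octave = int(tail)
--     except ValueError:
--         octave = 4
--     return (octave + 1) * 12 + PITCH_CLASS.get(name, 0)
--
--
-- def get_chord_for_scale_degree(degree: int, root: str, scale_type: str = "major") -> list[int]:
--     m = _root_midi(root + "4")
--     ext = EXT_INTERVALS.get(scale_type, EXT_INTERVALS["major"])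
--     k = len(ext) // 2
--     i = (degree - 1) % k
--     return [m + ext[i], m + ext[i + 2], m + ext[i + 4]]
-- ===== Notes on version B (the rewrite author's own statement) =====
-- stated objective: alternative
-- what changed: B parses the root pitch with a single left-to-right flat-normalizing scan plus a pitch-class dictionary and reads the triad straight out of a precomputed two-octave interval table, replacing A's six whole-string replace passes, NOTE_NAMES.index search, per-octave scale-note construction, modular third/fifth indexing and the two octave-fixing while-loops.
import Mathlib
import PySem

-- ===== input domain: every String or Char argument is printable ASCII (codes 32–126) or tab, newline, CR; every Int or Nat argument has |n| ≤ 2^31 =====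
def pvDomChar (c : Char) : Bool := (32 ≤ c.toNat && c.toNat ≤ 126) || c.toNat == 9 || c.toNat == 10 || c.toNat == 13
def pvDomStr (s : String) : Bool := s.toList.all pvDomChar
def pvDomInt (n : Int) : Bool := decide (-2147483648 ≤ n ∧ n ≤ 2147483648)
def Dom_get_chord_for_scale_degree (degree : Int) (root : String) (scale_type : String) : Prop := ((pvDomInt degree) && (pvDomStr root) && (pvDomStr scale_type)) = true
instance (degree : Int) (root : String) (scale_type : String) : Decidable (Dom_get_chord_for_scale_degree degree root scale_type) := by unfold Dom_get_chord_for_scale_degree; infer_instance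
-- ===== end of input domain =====

-- B parses the root pitch with a single flat-normalizing scan and a pitch-class dictionary and
-- reads the triad straight out of a precomputed two-octave interval table, replacing A's six
-- whole-string replace passes, list.index search, modular indexing and octave-fixing while-loops;
-- objective: alternative (a different decomposition of the same computation).

-- ===== PORT A =====  (shared module helpers, then A's body, transliterated)
def NOTE_NAMES : List String :=
  ["C", "C#", "D", "D#", "E", "F", "F#", "G", "G#", "A", "A#", "B"]

def SCALE_INTERVALS : PySem.Dict String (List Int) := PySem.Dict.ofList
  [("major", [0, 2, 4, 5, 7, 9, 11]),
   ("minor", [0, 2, 3, 5, 7, 8, 10]),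
   ("dorian", [0, 2, 3, 5, 7, 9, 10]),
   ("mixolydian", [0, 2, 4, 5, 7, 9, 10]),
   ("pentatonic_major", [0, 2, 4, 7, 9]),
   ("pentatonic_minor", [0, 3, 5, 7, 10]),
   ("blues", [0, 3, 5, 6, 7, 10])]

def note_name_to_midi (note : String) : Int :=
  let note := PySem.Str.strip note
  let note := PySem.Str.replace (PySem.Str.replace (PySem.Str.replace note "Db" "C#") "Eb" "D#") "Fb" "E"
  let note := PySem.Str.replace (PySem.Str.replace (PySem.Str.replace note "Gb" "F#") "Ab" "G#") "Bb" "A#"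
  let p : String × String :=
    if 2 ≤ PySem.Str.len note ∧ PySem.Str.pyGet? note 1 = some '#' then
      (PySem.Str.slice note none (some 2), PySem.Str.slice note (some 2) none)
    else
      -- note[0]: in every call note ends in the appended "4", so note is nonempty and
      -- the IndexError branch (pyGet? = none) is unreachable; "" there is a placeholder.
      ((PySem.Str.pyGet? note 0).elim "" (fun c => String.ofList [c]),
       PySem.Str.slice note (some 1) none)
  let octave : Int := (PySem.Int.ofStr? p.2).getD 4       -- try int(...) except ValueError: 4
  let note_index : Int :=
    (PySem.List.index? NOTE_NAMES p.1).elim 0 (fun i => (i : Int))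
  (octave + 1) * 12 + note_index

def get_scale_notes (root : String) (scale_type : String) : List Int :=
  let root_midi := note_name_to_midi (root ++ "4")
  -- SCALE_INTERVALS["major"] is present, so the KeyError of the default lookup is unreachable.
  let intervals := SCALE_INTERVALS.getD scale_type ((SCALE_INTERVALS.get? "major").getD [])
  intervals.map (fun interval => root_midi + interval)

-- while chord_third < chord_root: chord_third += 12   (same loop for the fifth)
def pyAscend (lo x : Int) : Int :=
  if x < lo then pyAscend lo (x + 12) else x
termination_by (lo - x).toNat
decreasing_by omega

def get_chord_for_scale_degree (degree : Int) (root : String) (scale_type : String) : List Int :=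
  let scale_notes := get_scale_notes root scale_type
  let chord_root_index := PySem.Int.mod (degree - 1) (scale_notes.length : Int)
  let chord_third_index := PySem.Int.mod (chord_root_index + 2) (scale_notes.length : Int)
  let chord_fifth_index := PySem.Int.mod (chord_root_index + 4) (scale_notes.length : Int)
  let chord_root := PySem.List.pyGetD scale_notes chord_root_index 0
  let chord_third := PySem.List.pyGetD scale_notes chord_third_index 0
  let chord_fifth := PySem.List.pyGetD scale_notes chord_fifth_index 0
  let chord_third := pyAscend chord_root chord_third
  let chord_fifth := pyAscend chord_third chord_fifth
  [chord_root, chord_third, chord_fifth]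

-- ===== PORT B =====
-- two octaves of each scale: ascending, so a triad is three direct reads
def EXT_INTERVALS : PySem.Dict String (List Int) :=
  PySem.Dict.ofList (SCALE_INTERVALS.items.map (fun p => (p.1, p.2 ++ p.2.map (fun x => x + 12))))

def FLAT_TO_SHARP : PySem.Dict Char String := PySem.Dict.ofList
  [('D', "C#"), ('E', "D#"), ('F', "E"), ('G', "F#"), ('A', "G#"), ('B', "A#")]

def PITCH_CLASS : PySem.Dict String Int := PySem.Dict.ofList
  [("C", 0), ("C#", 1), ("D", 2), ("D#", 3), ("E", 4), ("F", 5),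
   ("F#", 6), ("G", 7), ("G#", 8), ("A", 9), ("A#", 10), ("B", 11)]

-- the index-based while-loop of _normalize_flats, as structural recursion on the char list
def normalizeFlats : List Char → List Char
  | [] => []
  | [x] => [x]
  | x :: 'b' :: rest =>
    (match FLAT_TO_SHARP.get? x with
     | some r => r.toList ++ normalizeFlats rest
     | none => x :: normalizeFlats ('b' :: rest))
  | x :: y :: rest => x :: normalizeFlats (y :: rest)

def root_midi_alt (note : String) : Int :=
  let ns := normalizeFlats (PySem.Str.strip note).toList
  let p : List Char × List Char :=
    if 2 ≤ ns.length ∧ ns[1]? = some '#' then (ns.take 2, ns.drop 2)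
    else (ns.take 1, ns.drop 1)
  let octave : Int := (PySem.Int.ofChars? p.2).getD 4     -- try int(...) except ValueError: 4
  (octave + 1) * 12 + PITCH_CLASS.getD (String.ofList p.1) 0

def get_chord_for_scale_degree_alt (degree : Int) (root : String) (scale_type : String) : List Int :=
  let m := root_midi_alt (root ++ "4")
  let ext := EXT_INTERVALS.getD scale_type ((EXT_INTERVALS.get? "major").getD [])
  let k := PySem.Int.floordiv (ext.length : Int) 2
  let i := PySem.Int.mod (degree - 1) k
  [m + PySem.List.pyGetD ext i 0, m + PySem.List.pyGetD ext (i + 2) 0,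
   m + PySem.List.pyGetD ext (i + 4) 0]

-- ===== PRECONDITION & SPEC =====
def Spec_get_chord_for_scale_degree (degree : Int) (root : String) (scale_type : String) (out : List Int) : Prop := out = get_chord_for_scale_degree_alt degree root scale_type
instance (degree : Int) (root : String) (scale_type : String) (out : List Int) : Decidable (Spec_get_chord_for_scale_degree degree root scale_type out) := by unfold Spec_get_chord_for_scale_degree; infer_instance

-- ===== CLAIM (what is proved, stated in full; the proofs are below) =====
def Claim_equal_get_chord_for_scale_degree : Prop := ∀ (degree : Int) (root : String) (scale_type : String), Dom_get_chord_for_scale_degree degree root scale_type → Spec_get_chord_for_scale_degree degree root scale_type (get_chord_for_scale_degree degree root scale_type)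

-- ===== LEMMAS AND PROOFS =====

lemma pyAscend_le (lo x : Int) (h : lo ≤ x) : pyAscend lo x = x := by
  rw [pyAscend, if_neg (by omega)]

lemma pyAscend_once (lo x : Int) (h1 : x < lo) (h2 : lo ≤ x + 12) : pyAscend lo x = x + 12 := by
  rw [pyAscend, if_pos h1, pyAscend, if_neg (by omega)]

-- s.replace(X+'b', r), specialised to a two-character pattern, as structural recursion
def repl2 (X : Char) (r : List Char) : List Char → List Char
  | [] => []
  | [x] => [x]
  | x :: y :: t => if x = X ∧ y = 'b' then r ++ repl2 X r t else x :: repl2 X r (y :: t)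

lemma go_spec (X : Char) (r : List Char) :
    ∀ (fuel : Nat) (l acc : List Char), l.length ≤ fuel →
      PySem.Chars.replace.go [X, 'b'] r fuel l acc = acc.reverse ++ repl2 X r l := by
  intro fuel
  induction fuel with
  | zero =>
    intro l acc h
    have : l = [] := by cases l <;> simp_all
    subst this
    rw [PySem.Chars.replace.go.eq_def]
    simp [repl2]
  | succ n ih =>
    intro l acc h
    match l with
    | [] => rw [PySem.Chars.replace.go.eq_def]; simp [repl2]
    | [c] =>
      rw [PySem.Chars.replace.go.eq_def]
      have hpre : List.isPrefixOf [X, 'b'] [c] = false := by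
        simp [List.isPrefixOf]
      simp only [hpre, Bool.false_eq_true, if_false]
      rw [ih [] (c :: acc) (by simp)]
      simp [repl2]
    | c :: y :: u =>
      rw [PySem.Chars.replace.go.eq_def]
      by_cases hc : c = X ∧ y = 'b'
      · have hpre : List.isPrefixOf [X, 'b'] (c :: y :: u) = true := by
          simp [List.isPrefixOf, hc.1, hc.2]
        simp only [hpre, if_true]
        rw [show List.drop (List.length [X, 'b']) (c :: y :: u) = u from rfl]
        rw [ih u (r.reverse ++ acc) (by simp at h ⊢; omega)]
        rw [repl2, if_pos hc]
        simp
      · have hpre : List.isPrefixOf [X, 'b'] (c :: y :: u) = false := by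
          simp [List.isPrefixOf]
          intro h1 h2
          exact absurd ⟨h1.symm, h2.symm⟩ hc
        simp only [hpre, Bool.false_eq_true, if_false]
        rw [ih (y :: u) (c :: acc) (by simp at h ⊢; omega)]
        rw [repl2, if_neg hc]
        simp
lemma replace_eq_repl2 (X : Char) (r s : List Char) :
    PySem.Chars.replace s [X, 'b'] r = repl2 X r s := by
  rw [PySem.Chars.replace]
  simp only [List.isEmpty_cons, Bool.false_eq_true, if_false]
  rw [go_spec X r s.length s [] le_rfl]
  simp

lemma repl2_cons_ne (X : Char) (r : List Char) {x : Char} (h : x ≠ X) (t : List Char) :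
    repl2 X r (x :: t) = x :: repl2 X r t := by
  cases t with
  | nil => rfl
  | cons y u => rw [repl2, if_neg (by tauto)]

lemma repl2_cons_head (X : Char) (r : List Char) (x : Char) (l : List Char)
    (h : l.head? ≠ some 'b') : repl2 X r (x :: l) = x :: repl2 X r l := by
  cases l with
  | nil => rfl
  | cons y u => rw [repl2, if_neg (by simp at h; tauto)]

lemma head?_repl2_ne_b (X : Char) (r : List Char) (hr : r.head? ≠ some 'b') (hr0 : r ≠ [])
    (l : List Char) (h : l.head? ≠ some 'b') : (repl2 X r l).head? ≠ some 'b' := by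
  match l with
  | [] => simpa [repl2]
  | [x] => simpa [repl2] using h
  | x :: y :: u =>
    rw [repl2]
    split_ifs with hc
    · cases r with
      | nil => exact absurd rfl hr0
      | cons a b => simpa using hr
    · simpa using h

def chainFlats (s : List Char) : List Char :=
  repl2 'B' ['A', '#'] (repl2 'A' ['G', '#'] (repl2 'G' ['F', '#']
    (repl2 'F' ['E'] (repl2 'E' ['D', '#'] (repl2 'D' ['C', '#'] s)))))

lemma chain_eq_normalize (s : List Char) : chainFlats s = normalizeFlats s := by
  induction s using normalizeFlats.induct with
  | case1 => rfl
  | case2 x => rfl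
  | case3 x rest r hx ih =>
    -- x is one of the six flat-able letters; six concrete head-match computations
    have hx' := hx
    rw [show FLAT_TO_SHARP = PySem.Dict.mk
      [('D', "C#"), ('E', "D#"), ('F', "E"), ('G', "F#"), ('A', "G#"), ('B', "A#")] from rfl]
      at hx
    simp only [PySem.Dict.get?_mk_cons, beq_iff_eq] at hx
    split_ifs at hx with h1 h2 h3 h4 h5 h6 <;>
      [skip; skip; skip; skip; skip; skip; (simp [PySem.Dict.get?] at hx)] <;>
      (first | subst h1 | subst h2 | subst h3 | subst h4 | subst h5 | subst h6) <;>
      injection hx with hx <;> subst hx <;>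
      simp only [normalizeFlats, hx'] <;>
      simp only [chainFlats] at ih ⊢ <;>
      (repeat first
        | rw [repl2, if_pos (by exact ⟨rfl, rfl⟩)]
        | rw [repl2_cons_ne _ _ (by decide : ('b' : Char) ≠ 'D')]
        | rw [repl2_cons_ne _ _ (by decide : ('b' : Char) ≠ 'E')]
        | rw [repl2_cons_ne _ _ (by decide : ('b' : Char) ≠ 'F')]
        | rw [repl2_cons_ne _ _ (by decide : ('b' : Char) ≠ 'G')]
        | rw [repl2_cons_ne _ _ (by decide : ('b' : Char) ≠ 'A')]
        | rw [repl2_cons_ne _ _ (by decide : ('b' : Char) ≠ 'B')]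
        | rw [repl2_cons_ne _ _ (by decide)]
        | simp only [List.cons_append, List.nil_append]) <;>
      rw [ih] <;> rfl
  | case4 x rest hx ih =>
    -- lookup missed: x is none of the six letters; x and 'b' pass through every replace
    have hx' := hx
    rw [show FLAT_TO_SHARP = PySem.Dict.mk
      [('D', "C#"), ('E', "D#"), ('F', "E"), ('G', "F#"), ('A', "G#"), ('B', "A#")] from rfl]
      at hx
    simp only [PySem.Dict.get?_mk_cons, beq_iff_eq] at hx
    split_ifs at hx with h1 h2 h3 h4 h5 h6
    simp only [normalizeFlats, hx']
    rw [← ih]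
    simp only [chainFlats]
    repeat first
      | rw [repl2_cons_ne _ _ (Ne.symm h1)]
      | rw [repl2_cons_ne _ _ (Ne.symm h2)]
      | rw [repl2_cons_ne _ _ (Ne.symm h3)]
      | rw [repl2_cons_ne _ _ (Ne.symm h4)]
      | rw [repl2_cons_ne _ _ (Ne.symm h5)]
      | rw [repl2_cons_ne _ _ (Ne.symm h6)]
      | rw [repl2_cons_ne _ _ (by decide : ('b' : Char) ≠ 'D')]
      | rw [repl2_cons_ne _ _ (by decide : ('b' : Char) ≠ 'E')]
      | rw [repl2_cons_ne _ _ (by decide : ('b' : Char) ≠ 'F')]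
      | rw [repl2_cons_ne _ _ (by decide : ('b' : Char) ≠ 'G')]
      | rw [repl2_cons_ne _ _ (by decide : ('b' : Char) ≠ 'A')]
      | rw [repl2_cons_ne _ _ (by decide : ('b' : Char) ≠ 'B')]
  | case5 x y rest hy ih =>
    -- second character is not 'b': the head passes through every replace unchanged
    rw [normalizeFlats]
    rw [← ih]
    simp only [chainFlats]
    have n0 : (y :: rest).head? ≠ some 'b' := by simpa using hy
    have n1 := head?_repl2_ne_b 'D' ['C', '#'] (by decide) (by decide) _ n0
    have n2 := head?_repl2_ne_b 'E' ['D', '#'] (by decide) (by decide) _ n1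
    have n3 := head?_repl2_ne_b 'F' ['E'] (by decide) (by decide) _ n2
    have n4 := head?_repl2_ne_b 'G' ['F', '#'] (by decide) (by decide) _ n3
    have n5 := head?_repl2_ne_b 'A' ['G', '#'] (by decide) (by decide) _ n4
    rw [repl2_cons_head _ _ _ _ n0, repl2_cons_head _ _ _ _ n1, repl2_cons_head _ _ _ _ n2,
      repl2_cons_head _ _ _ _ n3, repl2_cons_head _ _ _ _ n4, repl2_cons_head _ _ _ _ n5]
    exact fun hb => hy hb

lemma pitch_eq (t : String) :
    (PySem.List.index? NOTE_NAMES t).elim 0 (fun i => (i : Int)) = PITCH_CLASS.getD t 0 := by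
  by_cases h1 : "C" = t; · subst h1; decide
  by_cases h2 : "C#" = t; · subst h2; decide
  by_cases h3 : "D" = t; · subst h3; decide
  by_cases h4 : "D#" = t; · subst h4; decide
  by_cases h5 : "E" = t; · subst h5; decide
  by_cases h6 : "F" = t; · subst h6; decide
  by_cases h7 : "F#" = t; · subst h7; decide
  by_cases h8 : "G" = t; · subst h8; decide
  by_cases h9 : "G#" = t; · subst h9; decide
  by_cases h10 : "A" = t; · subst h10; decide
  by_cases h11 : "A#" = t; · subst h11; decide
  by_cases h12 : "B" = t; · subst h12; decide
  have hidx : PySem.List.index? NOTE_NAMES t = none := by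
    rw [PySem.List.index?_eq_none_iff]
    intro hm
    simp [NOTE_NAMES] at hm
    rcases hm with h | h | h | h | h | h | h | h | h | h | h | h <;> simp_all
  have hget : PITCH_CLASS.getD t 0 = 0 := by
    rw [show PITCH_CLASS = PySem.Dict.mk
      [("C", 0), ("C#", 1), ("D", 2), ("D#", 3), ("E", 4), ("F", 5),
       ("F#", 6), ("G", 7), ("G#", 8), ("A", 9), ("A#", 10), ("B", 11)] from rfl]
    simp only [PySem.Dict.getD_eq_get?_getD, PySem.Dict.get?_mk_cons, beq_iff_eq]
    simp [h1, h2, h3, h4, h5, h6, h7, h8, h9, h10, h11, h12, PySem.Dict.get?]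
  rw [hidx, hget]
  rfl

lemma str_slice_from_two (t : String) :
    PySem.Str.slice t (some 2) none = String.ofList (t.toList.drop 2) := by
  rw [← String.ofList_toList (s := PySem.Str.slice t (some 2) none)]
  rw [PySem.Str.toList_slice, PySem.Chars.slice_eq_listSlice,
    PySem.List.slice_from t.toList (by norm_num)]
  rfl

lemma str_slice_from_one (t : String) :
    PySem.Str.slice t (some 1) none = String.ofList (t.toList.drop 1) := by
  rw [← String.ofList_toList (s := PySem.Str.slice t (some 1) none)]
  rw [PySem.Str.toList_slice, PySem.Chars.slice_eq_listSlice,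
    PySem.List.slice_from t.toList (by norm_num)]
  rfl

lemma str_slice_to_two (t : String) :
    PySem.Str.slice t none (some 2) = String.ofList (t.toList.take 2) := by
  rw [← String.ofList_toList (s := PySem.Str.slice t none (some 2))]
  rw [PySem.Str.toList_slice, PySem.Chars.slice_eq_listSlice,
    PySem.List.slice_to t.toList (by norm_num)]
  rfl

lemma str_head_take_one (t : String) :
    (PySem.Str.pyGet? t 0).elim "" (fun c => String.ofList [c]) = String.ofList (t.toList.take 1) := by
  rcases h : t.toList with _ | ⟨c, u⟩ <;> simp [h, PySem.List.pyGet?, PySem.List.pyIdx?]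

lemma midi_eq (s : String) : note_name_to_midi s = root_midi_alt s := by
  simp only [note_name_to_midi, root_midi_alt]
  have hl : (PySem.Str.replace (PySem.Str.replace (PySem.Str.replace
      (PySem.Str.replace (PySem.Str.replace (PySem.Str.replace
        (PySem.Str.strip s) "Db" "C#") "Eb" "D#") "Fb" "E") "Gb" "F#") "Ab" "G#") "Bb" "A#").toList
      = normalizeFlats (PySem.Str.strip s).toList := by
    simp only [PySem.Str.toList_replace]
    rw [show ("Db" : String).toList = ['D','b'] from rfl, show ("C#" : String).toList = ['C','#'] from rfl,
        show ("Eb" : String).toList = ['E','b'] from rfl, show ("D#" : String).toList = ['D','#'] from rfl,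
        show ("Fb" : String).toList = ['F','b'] from rfl, show ("E" : String).toList = ['E'] from rfl,
        show ("Gb" : String).toList = ['G','b'] from rfl, show ("F#" : String).toList = ['F','#'] from rfl,
        show ("Ab" : String).toList = ['A','b'] from rfl, show ("G#" : String).toList = ['G','#'] from rfl,
        show ("Bb" : String).toList = ['B','b'] from rfl, show ("A#" : String).toList = ['A','#'] from rfl]
    rw [replace_eq_repl2, replace_eq_repl2, replace_eq_repl2, replace_eq_repl2,
        replace_eq_repl2, replace_eq_repl2]
    have h := chain_eq_normalize (PySem.Str.strip s).toList
    simp only [chainFlats] at h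
    exact h
  generalize hA : (PySem.Str.replace (PySem.Str.replace (PySem.Str.replace
      (PySem.Str.replace (PySem.Str.replace (PySem.Str.replace
        (PySem.Str.strip s) "Db" "C#") "Eb" "D#") "Fb" "E") "Gb" "F#") "Ab" "G#") "Bb" "A#") = nA at hl ⊢
  have hcond : (2 ≤ PySem.Str.len nA ∧ PySem.Str.pyGet? nA 1 = some '#')
      = (2 ≤ (normalizeFlats (PySem.Str.strip s).toList).length ∧
         (normalizeFlats (PySem.Str.strip s).toList)[1]? = some '#') := by
    rw [← hl]
    have h1 : PySem.Str.pyGet? nA 1 = nA.toList[1]? := by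
      simp only [PySem.Str.pyGet?_eq, PySem.Chars.pyGet?_eq_listPyGet?]
      rw [show (1:Int) = ((1:Nat):Int) from rfl, PySem.List.pyGet?_natCast]
    have h2 : (2 ≤ PySem.Str.len nA) = (2 ≤ nA.toList.length) := by simp
    rw [h1, h2]
  simp only [hcond]
  by_cases hc : 2 ≤ (normalizeFlats (PySem.Str.strip s).toList).length ∧
      (normalizeFlats (PySem.Str.strip s).toList)[1]? = some '#'
  · rw [if_pos hc, if_pos hc]
    rw [str_slice_from_two, str_slice_to_two, hl]
    rw [PySem.Int.ofStr?]
    rw [show (String.ofList (List.drop 2 (normalizeFlats (PySem.Str.strip s).toList))).toList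
        = List.drop 2 (normalizeFlats (PySem.Str.strip s).toList) from by simp]
    rw [pitch_eq]
  · rw [if_neg hc, if_neg hc]
    rw [str_slice_from_one, str_head_take_one, hl]
    rw [PySem.Int.ofStr?]
    rw [show (String.ofList (List.drop 1 (normalizeFlats (PySem.Str.strip s).toList))).toList
        = List.drop 1 (normalizeFlats (PySem.Str.strip s).toList) from by simp]
    rw [pitch_eq]


lemma scales_cases (st : String) :
    (SCALE_INTERVALS.getD st ((SCALE_INTERVALS.get? "major").getD []),
      EXT_INTERVALS.getD st ((EXT_INTERVALS.get? "major").getD [])) = ([0, 2, 4, 5, 7, 9, 11], [0,  2,  4,  5,  7,  9,  11,  12,  14,  16,  17,  19,  21,  23]) ∨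
    (SCALE_INTERVALS.getD st ((SCALE_INTERVALS.get? "major").getD []),
      EXT_INTERVALS.getD st ((EXT_INTERVALS.get? "major").getD [])) = ([0, 2, 3, 5, 7, 8, 10], [0,  2,  3,  5,  7,  8,  10,  12,  14,  15,  17,  19,  20,  22]) ∨
    (SCALE_INTERVALS.getD st ((SCALE_INTERVALS.get? "major").getD []),
      EXT_INTERVALS.getD st ((EXT_INTERVALS.get? "major").getD [])) = ([0, 2, 3, 5, 7, 9, 10], [0,  2,  3,  5,  7,  9,  10,  12,  14,  15,  17,  19,  21,  22]) ∨
    (SCALE_INTERVALS.getD st ((SCALE_INTERVALS.get? "major").getD []),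
      EXT_INTERVALS.getD st ((EXT_INTERVALS.get? "major").getD [])) = ([0, 2, 4, 5, 7, 9, 10], [0,  2,  4,  5,  7,  9,  10,  12,  14,  16,  17,  19,  21,  22]) ∨
    (SCALE_INTERVALS.getD st ((SCALE_INTERVALS.get? "major").getD []),
      EXT_INTERVALS.getD st ((EXT_INTERVALS.get? "major").getD [])) = ([0, 2, 4, 7, 9], [0,  2,  4,  7,  9,  12,  14,  16,  19,  21]) ∨
    (SCALE_INTERVALS.getD st ((SCALE_INTERVALS.get? "major").getD []),
      EXT_INTERVALS.getD st ((EXT_INTERVALS.get? "major").getD [])) = ([0, 3, 5, 7, 10], [0,  3,  5,  7,  10,  12,  15,  17,  19,  22]) ∨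
    (SCALE_INTERVALS.getD st ((SCALE_INTERVALS.get? "major").getD []),
      EXT_INTERVALS.getD st ((EXT_INTERVALS.get? "major").getD [])) = ([0, 3, 5, 6, 7, 10], [0,  3,  5,  6,  7,  10,  12,  15,  17,  18,  19,  22]) := by
  rw [PySem.Dict.getD_eq_get?_getD, PySem.Dict.getD_eq_get?_getD,
    show (SCALE_INTERVALS.get? "major").getD [] = [0, 2, 4, 5, 7, 9, 11] from by decide,
    show (EXT_INTERVALS.get? "major").getD [] = [0, 2, 4, 5, 7, 9, 11, 12, 14, 16, 17, 19, 21, 23] from by decide]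
  rw [show SCALE_INTERVALS = PySem.Dict.mk
    [("major", [0, 2, 4, 5, 7, 9, 11]),
     ("minor", [0, 2, 3, 5, 7, 8, 10]),
     ("dorian", [0, 2, 3, 5, 7, 9, 10]),
     ("mixolydian", [0, 2, 4, 5, 7, 9, 10]),
     ("pentatonic_major", [0, 2, 4, 7, 9]),
     ("pentatonic_minor", [0, 3, 5, 7, 10]),
     ("blues", [0, 3, 5, 6, 7, 10])] from rfl]
  rw [show EXT_INTERVALS = PySem.Dict.mk
    [("major", [0, 2, 4, 5, 7, 9, 11, 12, 14, 16, 17, 19, 21, 23]),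
     ("minor", [0, 2, 3, 5, 7, 8, 10, 12, 14, 15, 17, 19, 20, 22]),
     ("dorian", [0, 2, 3, 5, 7, 9, 10, 12, 14, 15, 17, 19, 21, 22]),
     ("mixolydian", [0, 2, 4, 5, 7, 9, 10, 12, 14, 16, 17, 19, 21, 22]),
     ("pentatonic_major", [0, 2, 4, 7, 9, 12, 14, 16, 19, 21]),
     ("pentatonic_minor", [0, 3, 5, 7, 10, 12, 15, 17, 19, 22]),
     ("blues", [0, 3, 5, 6, 7, 10, 12, 15, 17, 18, 19, 22])] from rfl]
  simp only [PySem.Dict.get?_mk_cons]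
  split_ifs <;> simp_all [PySem.Dict.get?]


-- ===== VERDICT (by name: the statement is the Claim_ definition above) =====
theorem get_chord_for_scale_degree_spec : Claim_equal_get_chord_for_scale_degree := by
  intro degree root scale_type _
  simp only [Spec_get_chord_for_scale_degree, get_chord_for_scale_degree,
    get_chord_for_scale_degree_alt, get_scale_notes]
  rw [midi_eq]
  generalize root_midi_alt (root ++ "4") = m
  rcases scales_cases scale_type with h | h | h | h | h | h | h
  · rw [Prod.mk.injEq] at h
    obtain ⟨hiv, hext⟩ := h
    rw [hiv, hext]
    rw [show ((List.map (fun interval => m + interval) ([0, 2, 4, 5, 7, 9, 11] : List Int)).length : Int) = 7 from by norm_num]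
    rw [show PySem.Int.floordiv ((([0,  2,  4,  5,  7,  9,  11,  12,  14,  16,  17,  19,  21,  23] : List Int).length : Int)) 2 = 7 from by decide]
    have h0 := PySem.Int.mod_nonneg (degree - 1) (b := 7) (by norm_num)
    have h1 := PySem.Int.mod_lt (degree - 1) (b := 7) (by norm_num)
    obtain ⟨a, hA⟩ : ∃ a, PySem.Int.mod (degree - 1) 7 = a := ⟨_, rfl⟩
    rw [hA] at h0 h1 ⊢
    have hc : a = 0 ∨ a = 1 ∨ a = 2 ∨ a = 3 ∨ a = 4 ∨ a = 5 ∨ a = 6 := by omega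
    rcases hc with rfl|rfl|rfl|rfl|rfl|rfl|rfl <;>
      norm_num [PySem.Int.mod, Int.fmod_eq_emod, PySem.List.pyGetD_ofNat', List.cons_append,
        List.nil_append] <;>
      (repeat first
        | rw [pyAscend_le _ _ (by omega)]
        | rw [pyAscend_once _ _ (by omega) (by omega)]) <;>
      omega
  · rw [Prod.mk.injEq] at h
    obtain ⟨hiv, hext⟩ := h
    rw [hiv, hext]
    rw [show ((List.map (fun interval => m + interval) ([0, 2, 3, 5, 7, 8, 10] : List Int)).length : Int) = 7 from by norm_num]
    rw [show PySem.Int.floordiv ((([0,  2,  3,  5,  7,  8,  10,  12,  14,  15,  17,  19,  20,  22] : List Int).length : Int)) 2 = 7 from by decide]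
    have h0 := PySem.Int.mod_nonneg (degree - 1) (b := 7) (by norm_num)
    have h1 := PySem.Int.mod_lt (degree - 1) (b := 7) (by norm_num)
    obtain ⟨a, hA⟩ : ∃ a, PySem.Int.mod (degree - 1) 7 = a := ⟨_, rfl⟩
    rw [hA] at h0 h1 ⊢
    have hc : a = 0 ∨ a = 1 ∨ a = 2 ∨ a = 3 ∨ a = 4 ∨ a = 5 ∨ a = 6 := by omega
    rcases hc with rfl|rfl|rfl|rfl|rfl|rfl|rfl <;>
      norm_num [PySem.Int.mod, Int.fmod_eq_emod, PySem.List.pyGetD_ofNat', List.cons_append,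
        List.nil_append] <;>
      (repeat first
        | rw [pyAscend_le _ _ (by omega)]
        | rw [pyAscend_once _ _ (by omega) (by omega)]) <;>
      omega
  · rw [Prod.mk.injEq] at h
    obtain ⟨hiv, hext⟩ := h
    rw [hiv, hext]
    rw [show ((List.map (fun interval => m + interval) ([0, 2, 3, 5, 7, 9, 10] : List Int)).length : Int) = 7 from by norm_num]
    rw [show PySem.Int.floordiv ((([0,  2,  3,  5,  7,  9,  10,  12,  14,  15,  17,  19,  21,  22] : List Int).length : Int)) 2 = 7 from by decide]
    have h0 := PySem.Int.mod_nonneg (degree - 1) (b := 7) (by norm_num)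
    have h1 := PySem.Int.mod_lt (degree - 1) (b := 7) (by norm_num)
    obtain ⟨a, hA⟩ : ∃ a, PySem.Int.mod (degree - 1) 7 = a := ⟨_, rfl⟩
    rw [hA] at h0 h1 ⊢
    have hc : a = 0 ∨ a = 1 ∨ a = 2 ∨ a = 3 ∨ a = 4 ∨ a = 5 ∨ a = 6 := by omega
    rcases hc with rfl|rfl|rfl|rfl|rfl|rfl|rfl <;>
      norm_num [PySem.Int.mod, Int.fmod_eq_emod, PySem.List.pyGetD_ofNat', List.cons_append,
        List.nil_append] <;>
      (repeat first
        | rw [pyAscend_le _ _ (by omega)]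
        | rw [pyAscend_once _ _ (by omega) (by omega)]) <;>
      omega
  · rw [Prod.mk.injEq] at h
    obtain ⟨hiv, hext⟩ := h
    rw [hiv, hext]
    rw [show ((List.map (fun interval => m + interval) ([0, 2, 4, 5, 7, 9, 10] : List Int)).length : Int) = 7 from by norm_num]
    rw [show PySem.Int.floordiv ((([0,  2,  4,  5,  7,  9,  10,  12,  14,  16,  17,  19,  21,  22] : List Int).length : Int)) 2 = 7 from by decide]
    have h0 := PySem.Int.mod_nonneg (degree - 1) (b := 7) (by norm_num)
    have h1 := PySem.Int.mod_lt (degree - 1) (b := 7) (by norm_num)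
    obtain ⟨a, hA⟩ : ∃ a, PySem.Int.mod (degree - 1) 7 = a := ⟨_, rfl⟩
    rw [hA] at h0 h1 ⊢
    have hc : a = 0 ∨ a = 1 ∨ a = 2 ∨ a = 3 ∨ a = 4 ∨ a = 5 ∨ a = 6 := by omega
    rcases hc with rfl|rfl|rfl|rfl|rfl|rfl|rfl <;>
      norm_num [PySem.Int.mod, Int.fmod_eq_emod, PySem.List.pyGetD_ofNat', List.cons_append,
        List.nil_append] <;>
      (repeat first
        | rw [pyAscend_le _ _ (by omega)]
        | rw [pyAscend_once _ _ (by omega) (by omega)]) <;>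
      omega
  · rw [Prod.mk.injEq] at h
    obtain ⟨hiv, hext⟩ := h
    rw [hiv, hext]
    rw [show ((List.map (fun interval => m + interval) ([0, 2, 4, 7, 9] : List Int)).length : Int) = 5 from by norm_num]
    rw [show PySem.Int.floordiv ((([0,  2,  4,  7,  9,  12,  14,  16,  19,  21] : List Int).length : Int)) 2 = 5 from by decide]
    have h0 := PySem.Int.mod_nonneg (degree - 1) (b := 5) (by norm_num)
    have h1 := PySem.Int.mod_lt (degree - 1) (b := 5) (by norm_num)
    obtain ⟨a, hA⟩ : ∃ a, PySem.Int.mod (degree - 1) 5 = a := ⟨_, rfl⟩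
    rw [hA] at h0 h1 ⊢
    have hc : a = 0 ∨ a = 1 ∨ a = 2 ∨ a = 3 ∨ a = 4 := by omega
    rcases hc with rfl|rfl|rfl|rfl|rfl <;>
      norm_num [PySem.Int.mod, Int.fmod_eq_emod, PySem.List.pyGetD_ofNat', List.cons_append,
        List.nil_append] <;>
      (repeat first
        | rw [pyAscend_le _ _ (by omega)]
        | rw [pyAscend_once _ _ (by omega) (by omega)]) <;>
      omega
  · rw [Prod.mk.injEq] at h
    obtain ⟨hiv, hext⟩ := h
    rw [hiv, hext]
    rw [show ((List.map (fun interval => m + interval) ([0, 3, 5, 7, 10] : List Int)).length : Int) = 5 from by norm_num]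
    rw [show PySem.Int.floordiv ((([0,  3,  5,  7,  10,  12,  15,  17,  19,  22] : List Int).length : Int)) 2 = 5 from by decide]
    have h0 := PySem.Int.mod_nonneg (degree - 1) (b := 5) (by norm_num)
    have h1 := PySem.Int.mod_lt (degree - 1) (b := 5) (by norm_num)
    obtain ⟨a, hA⟩ : ∃ a, PySem.Int.mod (degree - 1) 5 = a := ⟨_, rfl⟩
    rw [hA] at h0 h1 ⊢
    have hc : a = 0 ∨ a = 1 ∨ a = 2 ∨ a = 3 ∨ a = 4 := by omega
    rcases hc with rfl|rfl|rfl|rfl|rfl <;>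
      norm_num [PySem.Int.mod, Int.fmod_eq_emod, PySem.List.pyGetD_ofNat', List.cons_append,
        List.nil_append] <;>
      (repeat first
        | rw [pyAscend_le _ _ (by omega)]
        | rw [pyAscend_once _ _ (by omega) (by omega)]) <;>
      omega
  · rw [Prod.mk.injEq] at h
    obtain ⟨hiv, hext⟩ := h
    rw [hiv, hext]
    rw [show ((List.map (fun interval => m + interval) ([0, 3, 5, 6, 7, 10] : List Int)).length : Int) = 6 from by norm_num]
    rw [show PySem.Int.floordiv ((([0,  3,  5,  6,  7,  10,  12,  15,  17,  18,  19,  22] : List Int).length : Int)) 2 = 6 from by decide]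
    have h0 := PySem.Int.mod_nonneg (degree - 1) (b := 6) (by norm_num)
    have h1 := PySem.Int.mod_lt (degree - 1) (b := 6) (by norm_num)
    obtain ⟨a, hA⟩ : ∃ a, PySem.Int.mod (degree - 1) 6 = a := ⟨_, rfl⟩
    rw [hA] at h0 h1 ⊢
    have hc : a = 0 ∨ a = 1 ∨ a = 2 ∨ a = 3 ∨ a = 4 ∨ a = 5 := by omega
    rcases hc with rfl|rfl|rfl|rfl|rfl|rfl <;>
      norm_num [PySem.Int.mod, Int.fmod_eq_emod, PySem.List.pyGetD_ofNat', List.cons_append,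
        List.nil_append] <;>
      (repeat first
        | rw [pyAscend_le _ _ (by omega)]
        | rw [pyAscend_once _ _ (by omega) (by omega)]) <;>
      omega
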